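-- pv_equiv track=rewrite | github.com/gabcoh/advent2022 | 08/solve.py | count_visible_down_right
-- ===== SOURCE A (Python) =====
-- def count_visible_down_right(trees):
--
--     visible = []
--
--     for transpose in [False, True]:
--         looking_down = [-1] * len(trees[0])
--         for i in range(len(trees)):
--             if transpose:
--                 i = len(trees) - i - 1
--             row = trees[i]
--             right_max = -1
--             for j in range(len(row)):
--                 if transpose:
--                     j = len(row) - j - 1
--                 col = row[j]
--                 should_add = False
--                 if col > right_max:
--                     should_add = True
--                     right_max = col
--                 if col > looking_down[j]:
--                     should_add = True
--                     looking_down[j] = col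
--                 if should_add and not (i, j) in visible:
--                     visible += [(i, j)]
--     return visible
-- ===== SOURCE B (Python) =====
-- def count_visible_down_right(trees):
--     m = len(trees[0])
--
--     def prefix_max(vals):
--         out = []
--         cur = -1
--         for v in vals:
--             out.append(cur)
--             cur = cur if cur > v else v
--         return out
--
--     def newmax(cm, row):
--         return [c if c > v else v for c, v in zip(cm, row)] + cm[len(row):]
--
--     def col_tables(rows):
--         tables = []
--         cm = [-1] * m
--         for row in rows:
--             tables.append(cm[:len(row)])
--             cm = newmax(cm, row)
--         return tables
--
--     max_left = [prefix_max(row) for row in trees]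
--     max_right = [list(reversed(prefix_max(list(reversed(row))))) for row in trees]
--     max_above = col_tables(trees)
--     max_below = list(reversed(col_tables(list(reversed(trees)))))
--
--     first = [(i, j)
--              for i, (row, ml, ma) in enumerate(zip(trees, max_left, max_above))
--              for j, (v, l, a) in enumerate(zip(row, ml, ma))
--              if v > l or v > a]
--     seen = set(first)
--     second = [(i, j)
--               for i, (row, mr, mb) in enumerate(zip(trees, max_right, max_below))
--               for j, (v, r, b) in enumerate(zip(row, mr, mb))
--               if (v > r or v > b) and (i, j) not in seen]
--     second.reverse()
--     return first + second
-- ===== Notes on version B (the rewrite author's own statement) =====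
-- stated objective: faster
-- what changed: Replaces A's two stateful in-place sweeps (running row/column maxima mutated inside nested index loops, with a linear 'not in visible' scan per cell) by precomputed prefix-maximum tables (max_left/max_right/max_above/max_below) consumed by two zip/enumerate comprehensions, with a hash set for the duplicate check.
import Mathlib
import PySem

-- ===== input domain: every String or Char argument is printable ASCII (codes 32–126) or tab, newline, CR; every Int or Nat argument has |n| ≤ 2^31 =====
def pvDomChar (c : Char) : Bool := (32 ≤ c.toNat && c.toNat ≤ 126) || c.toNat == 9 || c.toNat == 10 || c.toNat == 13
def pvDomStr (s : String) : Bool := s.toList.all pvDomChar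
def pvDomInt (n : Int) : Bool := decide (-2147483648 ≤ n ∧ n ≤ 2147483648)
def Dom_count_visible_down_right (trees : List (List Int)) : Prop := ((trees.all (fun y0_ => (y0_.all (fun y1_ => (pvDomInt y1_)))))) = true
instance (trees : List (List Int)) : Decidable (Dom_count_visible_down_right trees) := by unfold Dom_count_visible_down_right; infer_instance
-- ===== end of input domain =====

-- B replaces A's two stateful in-place sweeps (with a linear `not in visible` scan per cell)
-- by precomputed prefix-maximum tables consumed by zip/enumerate comprehensions and a set for dedup.


-- ===== PORT A =====
-- inner `for j in range(len(row))` loop of A, state (right_max, looking_down, visible)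
def aInner (iT : Nat) (transpose : Bool) (row : List Int)
    (j : Nat) (rm : Int) (ld : List Int) (vis : List (Int × Int)) :
    List Int × List (Int × Int) :=
  if h : j < row.length then
    let jj := if transpose then row.length - j - 1 else j
    let col := row.getD jj 0
    let sa1 : Bool := decide (col > rm)
    let rm' := if col > rm then col else rm
    let sa2 : Bool := sa1 || decide (col > ld.getD jj 0)
    let ld' := if col > ld.getD jj 0 then ld.set jj col else ld
    let vis' := if sa2 && !(vis.contains ((iT : Int), (jj : Int))) then
        vis ++ [((iT : Int), (jj : Int))] else vis
    aInner iT transpose row (j+1) rm' ld' vis'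
  else (ld, vis)
termination_by row.length - j

-- outer `for i in range(len(trees))` loop of A
def aOuter (trees : List (List Int)) (transpose : Bool) (i : Nat)
    (ld : List Int) (vis : List (Int × Int)) : List (Int × Int) :=
  if h : i < trees.length then
    let ii := if transpose then trees.length - i - 1 else i
    let row := trees.getD ii []
    let r := aInner ii transpose row 0 (-1) ld vis
    aOuter trees transpose (i+1) r.1 r.2
  else vis
termination_by trees.length - i

def count_visible_down_right (trees : List (List Int)) : List (Int × Int) :=
  let m := (trees.getD 0 []).length
  [false, true].foldl (fun vis transpose => aOuter trees transpose 0 (List.replicate m (-1)) vis) []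

-- ===== PORT B =====
-- `c if c > v else v`
def pvMaxCV (c v : Int) : Int := if c > v then c else v

-- Source B's prefix_max
def prefixMaxB (vals : List Int) : List Int :=
  (vals.foldl (fun (st : List Int × Int) v => (st.1 ++ [st.2], pvMaxCV st.2 v)) ([], -1)).1

-- Source B's newmax
def newmaxB (cm row : List Int) : List Int :=
  ((cm.zip row).map (fun p => pvMaxCV p.1 p.2)) ++ cm.drop row.length

-- Source B's col_tables
def colTablesB (m : Nat) (rows : List (List Int)) : List (List Int) :=
  (rows.foldl (fun (st : List (List Int) × List Int) row =>
      (st.1 ++ [st.2.take row.length], newmaxB st.2 row)) ([], List.replicate m (-1))).1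

def count_visible_down_right_alt (trees : List (List Int)) : List (Int × Int) :=
  let m := (trees.getD 0 []).length
  let maxLeft := trees.map (fun row => prefixMaxB row)
  let maxRight := trees.map (fun row => (prefixMaxB row.reverse).reverse)
  let maxAbove := colTablesB m trees
  let maxBelow := (colTablesB m trees.reverse).reverse
  let first := (PySem.List.enumerate (trees.zip (maxLeft.zip maxAbove)) 0).flatMap (fun p =>
      (PySem.List.enumerate (p.2.1.zip (p.2.2.1.zip p.2.2.2)) 0).filterMap (fun q =>
        if q.2.1 > q.2.2.1 ∨ q.2.1 > q.2.2.2 then some (p.1, q.1) else none))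
  let seen : PySem.Set (Int × Int) := PySem.Set.ofList first
  let second := (PySem.List.enumerate (trees.zip (maxRight.zip maxBelow)) 0).flatMap (fun p =>
      (PySem.List.enumerate (p.2.1.zip (p.2.2.1.zip p.2.2.2)) 0).filterMap (fun q =>
        if (q.2.1 > q.2.2.1 ∨ q.2.1 > q.2.2.2) ∧ ¬ (PySem.Set.contains seen (p.1, q.1) = true)
        then some (p.1, q.1) else none))
  first ++ second.reverse

-- ===== PRECONDITION & SPEC =====
-- Pre_ excludes exactly the inputs on which A raises IndexError: the empty grid (trees[0])
-- and ragged grids with a row longer than trees[0] (looking_down[j] out of range).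
def Pre_count_visible_down_right (trees : List (List Int)) : Prop :=
  trees ≠ [] ∧ ∀ row ∈ trees, row.length ≤ (trees.getD 0 []).length
instance (trees : List (List Int)) : Decidable (Pre_count_visible_down_right trees) := by
  unfold Pre_count_visible_down_right; infer_instance

def pvWitness_count_visible_down_right : List (List Int) := [[3, 0], [1, 2]]

def Spec_count_visible_down_right (trees : List (List Int)) (out : List (Int × Int)) : Prop := out = count_visible_down_right_alt trees
instance (trees : List (List Int)) (out : List (Int × Int)) : Decidable (Spec_count_visible_down_right trees out) := by unfold Spec_count_visible_down_right; infer_instance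

-- ===== CLAIM (what is proved, stated in full; the proofs are below) =====
def Claim_equal_count_visible_down_right : Prop := ∀ (trees : List (List Int)), Dom_count_visible_down_right trees → Pre_count_visible_down_right trees → Spec_count_visible_down_right trees (count_visible_down_right trees)

-- ===== LEMMAS AND PROOFS =====

-- structural prefix-maximum
def pM (cur : Int) : List Int → List Int
  | [] => []
  | v :: vs => cur :: pM (pvMaxCV cur v) vs

-- structural column-snapshot tables
def snaps (cm : List Int) : List (List Int) → List (List Int)
  | [] => []
  | row :: rest => cm.take row.length :: snaps (newmaxB cm row) rest

-- structural "update ld by row" (value of looking_down after one row)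
def updL : List Int → List Int → List Int
  | [], ds => ds
  | _ :: _, [] => []
  | v :: vs, d :: ds => (if v > d then v else d) :: updL vs ds

-- structural spec of aInner: consumes the row suffix and the aligned looking_down suffix
def inn (i : Int) (jmap : Nat → Int) (k : Nat) (cur : Int) :
    List Int → List Int → List (Int × Int) → List Int × List (Int × Int)
  | [], ds, vis => (ds, vis)
  | _ :: _, [], vis => ([], vis)
  | v :: vs, d :: ds, vis =>
      let c : Bool := decide (v > cur) || decide (v > d)
      let vis' := if c && !(vis.contains (i, jmap k)) then vis ++ [(i, jmap k)] else vis
      let r := inn i jmap (k+1) (if v > cur then v else cur) vs ds vis'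
      ((if v > d then v else d) :: r.1, r.2)

-- the coords appended by inn, relative to a FIXED membership list vis
def filt (i : Int) (jmap : Nat → Int) (vis : List (Int × Int)) :
    Nat → Int → List Int → List Int → List (Int × Int)
  | _, _, [], _ => []
  | _, _, _ :: _, [] => []
  | k, cur, v :: vs, d :: ds =>
      (if (decide (v > cur) || decide (v > d)) && !(vis.contains (i, jmap k))
       then [(i, jmap k)] else []) ++
      filt i jmap vis (k+1) (if v > cur then v else cur) vs ds

-- same, with explicit coordinate and prefix-max lists
def filtC (seen : List (Int × Int)) :
    List (Int × Int) → List Int → List Int → List Int → List (Int × Int)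
  | c :: cs, v :: vs, l :: ls, d :: ds =>
      (if (decide (v > l) || decide (v > d)) && !(seen.contains c) then [c] else []) ++
      filtC seen cs vs ls ds
  | _, _, _, _ => []

def coordsA (i : Nat) (k : Nat) (len : Nat) : List (Int × Int) :=
  (List.range' k len).map (fun t : Nat => ((i : Int), (t : Int)))

-- rows of pass 1, from row index i with column state ld
def pass1F (i : Nat) (ld : List Int) : List (List Int) → List (Int × Int)
  | [] => []
  | row :: rest =>
      filtC [] (coordsA i 0 row.length) row (pM (-1) row) ld ++ pass1F (i+1) (updL row ld) rest

-- rows of pass 2 (rows given bottom-up, first row has index ii), coords vs `first`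
def pass2F (first : List (Int × Int)) (ii : Nat) (ld : List Int) :
    List (List Int) → List (Int × Int)
  | [] => []
  | row :: rest =>
      (filtC first (coordsA ii 0 row.length) row ((pM (-1) row.reverse).reverse) (ld.take row.length)).reverse ++
      pass2F first (ii - 1) (updL row ld) rest

theorem prefixMax_foldl (vals : List Int) : ∀ (acc : List Int) (cur : Int),
    (vals.foldl (fun (st : List Int × Int) v => (st.1 ++ [st.2], pvMaxCV st.2 v)) (acc, cur)).1
      = acc ++ pM cur vals := by
  induction vals with
  | nil => intro acc cur; simp [pM]
  | cons v vs ih => intro acc cur; simp [List.foldl_cons, ih, pM]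

theorem prefixMaxB_eq_pM (vals : List Int) : prefixMaxB vals = pM (-1) vals := by
  simpa using prefixMax_foldl vals [] (-1)

theorem colTables_foldl (rows : List (List Int)) : ∀ (acc : List (List Int)) (cm : List Int),
    (rows.foldl (fun (st : List (List Int) × List Int) row =>
        (st.1 ++ [st.2.take row.length], newmaxB st.2 row)) (acc, cm)).1
      = acc ++ snaps cm rows := by
  induction rows with
  | nil => intro acc cm; simp [snaps]
  | cons r rs ih => intro acc cm; simp [List.foldl_cons, ih, snaps]

theorem colTablesB_eq_snaps (m : Nat) (rows : List (List Int)) :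
    colTablesB m rows = snaps (List.replicate m (-1)) rows := by
  simpa using colTables_foldl rows [] (List.replicate m (-1))

theorem updL_length (vs ds : List Int) (h : vs.length ≤ ds.length) :
    (updL vs ds).length = ds.length := by
  induction vs generalizing ds with
  | nil => simp [updL]
  | cons v vs ih =>
    cases ds with
    | nil => simp at h
    | cons d ds => simp [updL]; exact ih ds (by simpa using h)

theorem updL_eq_newmaxB (vs ds : List Int) : updL vs ds = newmaxB ds vs := by
  induction vs generalizing ds with
  | nil => simp [updL, newmaxB]
  | cons v vs ih =>
    cases ds with
    | nil => simp [updL, newmaxB]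
    | cons d ds =>
      simp [updL, newmaxB, ih ds, pvMaxCV]
      split_ifs <;> omega

theorem inn_fst (i : Int) (jmap : Nat → Int) (k : Nat) (cur : Int)
    (vs ds : List Int) (vis : List (Int × Int)) :
    (inn i jmap k cur vs ds vis).1 = updL vs ds := by
  induction vs generalizing ds k cur vis with
  | nil => simp [inn, updL]
  | cons v vs ih =>
    cases ds with
    | nil => simp [inn, updL]
    | cons d ds => simp only [inn, updL]; rw [ih]

theorem filt_append (i : Int) (jmap : Nat → Int) (vis extra : List (Int × Int))
    (k : Nat) (cur : Int) (vs ds : List Int)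
    (h : ∀ p ∈ extra, ∀ k', k ≤ k' → k' < k + vs.length → p ≠ (i, jmap k')) :
    filt i jmap (vis ++ extra) k cur vs ds = filt i jmap vis k cur vs ds := by
  induction vs generalizing ds k cur with
  | nil => simp [filt]
  | cons v vs ih =>
    cases ds with
    | nil => simp [filt]
    | cons d ds =>
      have hnm : (i, jmap k) ∉ extra := fun hc => h _ hc k le_rfl (by simp) rfl
      have hne : extra.contains (i, jmap k) = false := by simp [hnm]
      simp only [filt, List.contains_append, hne, Bool.or_false]
      rw [ih (k+1) (if v > cur then v else cur) ds
          (fun p hp k' hk1 hk2 => h p hp k' (by omega) (by simp; omega))]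

theorem inn_snd (i : Int) (jmap : Nat → Int) (k : Nat) (cur : Int) (vs ds : List Int)
    (vis : List (Int × Int))
    (hinj : ∀ k1 k2, k ≤ k1 → k1 < k + vs.length → k ≤ k2 → k2 < k + vs.length →
        jmap k1 = jmap k2 → k1 = k2) :
    (inn i jmap k cur vs ds vis).2 = vis ++ filt i jmap vis k cur vs ds := by
  induction vs generalizing ds k cur vis with
  | nil => simp [inn, filt]
  | cons v vs ih =>
    cases ds with
    | nil => simp [inn, filt]
    | cons d ds =>
      simp only [inn, filt]
      by_cases hc : ((decide (v > cur) || decide (v > d)) && !(vis.contains (i, jmap k))) = true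
      · simp only [hc, if_true]
        rw [ih (k+1) (if v > cur then v else cur) ds _
            (fun k1 k2 h1 h2 h3 h4 he => hinj k1 k2 (by omega) (by simp; omega)
              (by omega) (by simp; omega) he)]
        rw [filt_append i jmap vis [(i, jmap k)] (k+1) _ vs ds
          (by intro p hp k' hk' hk2 hpe
              simp only [List.mem_singleton] at hp
              subst hp
              simp only [Prod.mk.injEq, true_and] at hpe
              have := hinj k k' (le_rfl) (by simp) (by omega) (by simp; omega) hpe
              omega)]
        simp
      · simp only [Bool.not_eq_true] at hc
        simp only [hc, Bool.false_eq_true, if_false]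
        rw [ih (k+1) (if v > cur then v else cur) ds _
            (fun k1 k2 h1 h2 h3 h4 he => hinj k1 k2 (by omega) (by simp; omega)
              (by omega) (by simp; omega) he)]
        simp

theorem filt_eq_filtC (i : Int) (jmap : Nat → Int) (vis : List (Int × Int))
    (k : Nat) (cur : Int) (vs ds : List Int) :
    filt i jmap vis k cur vs ds =
      filtC vis ((List.range' k vs.length).map (fun t => (i, jmap t))) vs (pM cur vs) ds := by
  induction vs generalizing ds k cur with
  | nil => simp [filt, filtC]
  | cons v vs ih =>
    cases ds with
    | nil => simp [filt, pM, List.range'_succ, filtC]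
    | cons d ds =>
      simp only [filt, pM, List.length_cons, List.range'_succ, List.map_cons, filtC]
      rw [show (if v > cur then v else cur) = pvMaxCV cur v from by
            unfold pvMaxCV; split_ifs <;> omega]
      rw [ih]

theorem filtC_append_aux (seen : List (Int × Int)) (cs : List (Int × Int))
    (vs ls ds : List Int) (c : Int × Int) (v l d : Int)
    (h1 : vs.length = cs.length) (h2 : ls.length = cs.length) (h3 : ds.length = cs.length) :
    filtC seen (cs ++ [c]) (vs ++ [v]) (ls ++ [l]) (ds ++ [d]) =
      filtC seen cs vs ls ds ++ filtC seen [c] [v] [l] [d] := by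
  induction cs generalizing vs ls ds with
  | nil =>
    have : vs = [] := List.eq_nil_of_length_eq_zero (by simpa using h1)
    have h2' : ls = [] := List.eq_nil_of_length_eq_zero (by simpa using h2)
    have h3' : ds = [] := List.eq_nil_of_length_eq_zero (by simpa using h3)
    subst this; subst h2'; subst h3'
    simp [filtC]
  | cons c' cs ih =>
    cases vs with
    | nil => simp at h1
    | cons v' vs =>
      cases ls with
      | nil => simp at h2
      | cons l' ls =>
        cases ds with
        | nil => simp at h3
        | cons d' ds =>
          simp only [List.cons_append, filtC]
          rw [ih vs ls ds (by simpa using h1) (by simpa using h2) (by simpa using h3)]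
          simp [filtC]

theorem filtC_reverse (seen : List (Int × Int)) (cs : List (Int × Int))
    (vs ls ds : List Int) (h1 : vs.length = cs.length) (h2 : ls.length = cs.length)
    (h3 : ds.length = cs.length) :
    filtC seen cs.reverse vs.reverse ls.reverse ds.reverse = (filtC seen cs vs ls ds).reverse := by
  induction cs generalizing vs ls ds with
  | nil =>
    have : vs = [] := List.eq_nil_of_length_eq_zero (by simpa using h1)
    subst this
    simp [filtC]
  | cons c cs ih =>
    cases vs with
    | nil => simp at h1
    | cons v vs =>
      cases ls with
      | nil => simp at h2
      | cons l ls =>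
        cases ds with
        | nil => simp at h3
        | cons d ds =>
          simp only [List.reverse_cons]
          rw [filtC_append_aux seen cs.reverse vs.reverse ls.reverse ds.reverse c v l d
                (by simpa using h1) (by simpa using h2) (by simpa using h3),
              ih vs ls ds (by simpa using h1) (by simpa using h2) (by simpa using h3)]
          simp [filtC]
          split_ifs <;> simp

theorem filtC_ds_take (seen : List (Int × Int)) (cs : List (Int × Int))
    (vs ls ds : List Int) (n : Nat) (h : vs.length ≤ n) :
    filtC seen cs vs ls (ds.take n) = filtC seen cs vs ls ds := by
  induction cs generalizing vs ls ds n with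
  | nil => simp [filtC]
  | cons c cs ih =>
    cases vs with
    | nil => simp [filtC]
    | cons v vs =>
      cases ls with
      | nil => simp [filtC]
      | cons l ls =>
        cases ds with
        | nil => simp [filtC]
        | cons d ds =>
          cases n with
          | zero => simp at h
          | succ n =>
            simp only [List.take_succ_cons, filtC]
            rw [ih _ _ _ n (by simpa using h)]

theorem filtC_seen_ext (seen1 seen2 : List (Int × Int)) (cs : List (Int × Int))
    (vs ls ds : List Int) (h : ∀ c ∈ cs, seen1.contains c = seen2.contains c) :
    filtC seen1 cs vs ls ds = filtC seen2 cs vs ls ds := by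
  induction cs generalizing vs ls ds with
  | nil => simp [filtC]
  | cons c cs ih =>
    cases vs with
    | nil => simp [filtC]
    | cons v vs =>
      cases ls with
      | nil => simp [filtC]
      | cons l ls =>
        cases ds with
        | nil => simp [filtC]
        | cons d ds =>
          simp only [filtC, h c (by simp)]
          rw [ih _ _ _ (fun c hc => h c (by simp [hc]))]

theorem pM_length (cur : Int) (vs : List Int) : (pM cur vs).length = vs.length := by
  induction vs generalizing cur with
  | nil => simp [pM]
  | cons v vs ih => simp [pM, ih]

theorem snaps_length (cm : List Int) (rows : List (List Int)) :
    (snaps cm rows).length = rows.length := by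
  induction rows generalizing cm with
  | nil => simp [snaps]
  | cons r rs ih => simp [snaps, ih]

theorem updL_append_aux (vs ds : List Int) (v d : Int) (h : vs.length = ds.length) :
    updL (vs ++ [v]) (ds ++ [d]) = updL vs ds ++ [if v > d then v else d] := by
  induction vs generalizing ds with
  | nil =>
    have : ds = [] := List.eq_nil_of_length_eq_zero (by simp at h; omega)
    subst this; simp [updL]
  | cons v' vs ih =>
    cases ds with
    | nil => simp at h
    | cons d' ds =>
      simp only [List.cons_append, updL]
      rw [ih ds (by simpa using h)]

theorem updL_reverse (vs ds : List Int) (h : vs.length = ds.length) :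
    updL vs.reverse ds.reverse = (updL vs ds).reverse := by
  induction vs generalizing ds with
  | nil =>
    have : ds = [] := List.eq_nil_of_length_eq_zero (by simp at h; omega)
    subst this; simp [updL]
  | cons v vs ih =>
    cases ds with
    | nil => simp at h
    | cons d ds =>
      simp only [List.reverse_cons]
      rw [updL_append_aux vs.reverse ds.reverse v d (by simp; simpa using h),
          ih ds (by simpa using h)]
      simp [updL]

theorem updL_take (vs ds : List Int) (h : vs.length ≤ ds.length) :
    updL vs (ds.take vs.length) ++ ds.drop vs.length = updL vs ds := by
  induction vs generalizing ds with
  | nil => simp [updL]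
  | cons v vs ih =>
    cases ds with
    | nil => simp at h
    | cons d ds =>
      simp only [List.length_cons, List.take_succ_cons, List.drop_succ_cons, updL, List.cons_append]
      rw [ih ds (by simpa using h)]

theorem filtC_mem (seen cs : List (Int × Int)) (vs ls ds : List Int) (p : Int × Int)
    (hp : p ∈ filtC seen cs vs ls ds) : p ∈ cs := by
  induction cs generalizing vs ls ds with
  | nil => simp [filtC] at hp
  | cons c cs ih =>
    cases vs with
    | nil => simp [filtC] at hp
    | cons v vs =>
      cases ls with
      | nil => simp [filtC] at hp
      | cons l ls =>
        cases ds with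
        | nil => simp [filtC] at hp
        | cons d ds =>
          simp only [filtC, List.mem_append] at hp
          rcases hp with hp | hp
          · split at hp
            · simp at hp; simp [hp]
            · simp at hp
          · exact List.mem_cons_of_mem _ (ih _ _ _ hp)

theorem mem_coordsA_fst (i k len : Nat) (p : Int × Int) (hp : p ∈ coordsA i k len) :
    p.1 = (i : Int) := by
  simp only [coordsA, List.mem_map] at hp
  obtain ⟨t, _, ht⟩ := hp
  rw [← ht]

theorem range'_shift (L s : Nat) : List.range' (s+1) L = (List.range' s L).map (·+1) := by
  induction L generalizing s with
  | zero => simp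
  | succ L ih => simp only [List.range'_succ, List.map_cons, ih (s+1)]

theorem coordsA_rev (i L : Nat) :
    (List.range' 0 L).map (fun t => ((i : Int), ((L - t - 1 : Nat) : Int))) =
      (coordsA i 0 L).reverse := by
  induction L with
  | zero => simp [coordsA]
  | succ L ih =>
    have hsplit : List.range' 0 (L+1) = List.range' 0 L ++ [L] := by
      simp [List.range'_1_concat]
    conv_rhs => rw [coordsA, hsplit]
    rw [List.map_append, List.reverse_append]
    simp only [List.map_cons, List.map_nil, List.reverse_cons, List.reverse_nil, List.nil_append,
      List.singleton_append]
    rw [coordsA] at ih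
    rw [← ih]
    have hcons : List.range' 0 (L+1) = 0 :: List.range' 1 L := by rw [List.range'_succ]
    conv_lhs => rw [hcons]
    rw [List.map_cons, show (1 : Nat) = 0 + 1 from rfl, range'_shift, List.map_map]
    have hhead : (L + 1 - 0 - 1 : Nat) = L := by omega
    rw [hhead]
    congr 1
    apply List.map_congr_left
    intro u _
    have harith : L + 1 - (u + 1) - 1 = L - u - 1 := by omega
    simp [Function.comp, harith]

theorem aInner_false (i : Nat) (row : List Int) (j : Nat) (rm : Int)
    (ld : List Int) (vis : List (Int × Int)) (hl : row.length ≤ ld.length) :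
    aInner i false row j rm ld vis =
      (ld.take j ++ (inn (i : Int) (fun k => (k : Int)) j rm (row.drop j) (ld.drop j) vis).1,
       (inn (i : Int) (fun k => (k : Int)) j rm (row.drop j) (ld.drop j) vis).2) := by
  suffices H : ∀ n j rm (ld : List Int) (vis : List (Int × Int)), row.length ≤ ld.length →
      row.length - j = n →
      aInner i false row j rm ld vis =
        (ld.take j ++ (inn (i : Int) (fun k => (k : Int)) j rm (row.drop j) (ld.drop j) vis).1,
         (inn (i : Int) (fun k => (k : Int)) j rm (row.drop j) (ld.drop j) vis).2) from
    H _ j rm ld vis hl rfl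
  intro n
  induction n with
  | zero =>
    intro j rm ld vis hl hn
    have hj : ¬ j < row.length := by omega
    rw [aInner, dif_neg hj, List.drop_eq_nil_of_le (by omega : row.length ≤ j)]
    simp [inn]
  | succ n ih =>
    intro j rm ld vis hl hn
    have hj : j < row.length := by omega
    have hjl : j < ld.length := by omega
    have hrd : row.drop j = row[j] :: row.drop (j+1) := List.drop_eq_getElem_cons hj
    have hldd : ld.drop j = ld[j] :: ld.drop (j+1) := List.drop_eq_getElem_cons hjl
    have hgr : row.getD j 0 = row[j] := List.getD_eq_getElem row 0 hj
    have hgl : ld.getD j 0 = ld[j] := List.getD_eq_getElem ld 0 hjl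
    have hlt : (ld.take j).length = j := List.length_take_of_le hjl.le
    rw [aInner, dif_pos hj]
    simp only [Bool.false_eq_true, if_false, hgr, hgl, hrd, hldd, inn]
    by_cases hcl : row[j] > ld[j]
    · simp only [if_pos hcl]
      rw [ih (j+1) _ (ld.set j row[j]) _ (by simpa using hl) (by omega)]
      have h1 : (ld.set j row[j]).take (j+1) = ld.take j ++ [row[j]] := by
        rw [List.set_eq_take_cons_drop _ hjl, List.take_append, hlt,
            show j + 1 - j = 1 from by omega,
            List.take_of_length_le (by omega : (ld.take j).length ≤ j + 1)]
        simp
      have h2 : (ld.set j row[j]).drop (j+1) = ld.drop (j+1) := by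
        rw [List.set_eq_take_cons_drop _ hjl, List.drop_append, hlt,
            show j + 1 - j = 1 from by omega,
            List.drop_eq_nil_of_le (by rw [hlt]; omega : (ld.take j).length ≤ j + 1)]
        simp
      rw [h1, h2, List.append_assoc]
      rfl
    · simp only [if_neg hcl]
      rw [ih (j+1) _ ld _ hl (by omega)]
      have h1 : ld.take (j+1) = ld.take j ++ [ld[j]] := by
        rw [List.take_add_one]
        simp [List.getElem?_eq_getElem hjl]
      rw [h1, List.append_assoc]
      rfl

theorem aInner_true (i : Nat) (row : List Int) (j : Nat) (rm : Int)
    (ld : List Int) (vis : List (Int × Int)) (hl : row.length ≤ ld.length) :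
    aInner i true row j rm ld vis =
      (((inn (i : Int) (fun k => ((row.length - k - 1 : Nat) : Int)) j rm
          ((row.take (row.length - j)).reverse) ((ld.take (row.length - j)).reverse) vis).1).reverse
        ++ ld.drop (row.length - j),
       (inn (i : Int) (fun k => ((row.length - k - 1 : Nat) : Int)) j rm
          ((row.take (row.length - j)).reverse) ((ld.take (row.length - j)).reverse) vis).2) := by
  suffices H : ∀ n j rm (ld : List Int) (vis : List (Int × Int)), row.length ≤ ld.length →
      row.length - j = n →
      aInner i true row j rm ld vis =
        (((inn (i : Int) (fun k => ((row.length - k - 1 : Nat) : Int)) j rm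
            ((row.take (row.length - j)).reverse) ((ld.take (row.length - j)).reverse) vis).1).reverse
          ++ ld.drop (row.length - j),
         (inn (i : Int) (fun k => ((row.length - k - 1 : Nat) : Int)) j rm
            ((row.take (row.length - j)).reverse) ((ld.take (row.length - j)).reverse) vis).2) from
    H _ j rm ld vis hl rfl
  intro n
  induction n with
  | zero =>
    intro j rm ld vis hl hn
    have hj : ¬ j < row.length := by omega
    rw [aInner, dif_neg hj, hn]
    simp [inn]
  | succ n ih =>
    intro j rm ld vis hl hn
    have hj : j < row.length := by omega
    obtain ⟨t, ht⟩ : ∃ t, t = row.length - j - 1 := ⟨_, rfl⟩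
    have hjL : t < row.length := by omega
    have hjld : t < ld.length := by omega
    have e2t : row.length - j = t + 1 := by omega
    rw [aInner, dif_pos hj]
    simp only [if_true]
    rw [← ht, e2t]
    have hgr : row.getD t 0 = row[t] := List.getD_eq_getElem row 0 hjL
    have hgl : ld.getD t 0 = ld[t] := List.getD_eq_getElem ld 0 hjld
    have htr : (row.take (t+1)).reverse = row[t] :: (row.take t).reverse := by
      rw [List.take_add_one]
      simp [List.getElem?_eq_getElem hjL]
    have htl : (ld.take (t+1)).reverse = ld[t] :: (ld.take t).reverse := by
      rw [List.take_add_one]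
      simp [List.getElem?_eq_getElem hjld]
    have hlt : (ld.take t).length = t := List.length_take_of_le hjld.le
    simp only [hgr, hgl, htr, htl, inn]
    simp only [← ht]
    by_cases hcl : row[t] > ld[t]
    · simp only [if_pos hcl]
      rw [ih (j+1) _ (ld.set t row[t]) _ (by simpa using hl) (by omega)]
      have e1t : row.length - (j+1) = t := by omega
      rw [e1t]
      have h1 : (ld.set t row[t]).take t = ld.take t := by
        rw [List.set_eq_take_cons_drop _ hjld, List.take_append, hlt]
        simp [List.take_take]
      have h2 : (ld.set t row[t]).drop t = row[t] :: ld.drop (t+1) := by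
        rw [List.set_eq_take_cons_drop _ hjld, List.drop_append, hlt,
            List.drop_eq_nil_of_le (by rw [hlt] : (ld.take t).length ≤ t)]
        simp
      rw [h1, h2]
      simp
    · simp only [if_neg hcl]
      rw [ih (j+1) _ ld _ hl (by omega)]
      have e1t : row.length - (j+1) = t := by omega
      rw [e1t, List.drop_eq_getElem_cons hjld]
      simp

theorem aOuter_false (trees : List (List Int)) (i : Nat) (ld : List Int)
    (vis : List (Int × Int))
    (hl : ∀ row ∈ trees, row.length ≤ ld.length)
    (hv : ∀ p ∈ vis, ∀ i' : Nat, i ≤ i' → p.1 ≠ (i' : Int)) :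
    aOuter trees false i ld vis = vis ++ pass1F i ld (trees.drop i) := by
  suffices H : ∀ n i (ld : List Int) (vis : List (Int × Int)),
      (∀ row ∈ trees, row.length ≤ ld.length) →
      (∀ p ∈ vis, ∀ i' : Nat, i ≤ i' → p.1 ≠ (i' : Int)) →
      trees.length - i = n →
      aOuter trees false i ld vis = vis ++ pass1F i ld (trees.drop i) from
    H _ i ld vis hl hv rfl
  intro n
  induction n with
  | zero =>
    intro i ld vis hl hv hn
    have hi : ¬ i < trees.length := by omega
    rw [aOuter, dif_neg hi, List.drop_eq_nil_of_le (by omega : trees.length ≤ i)]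
    simp [pass1F]
  | succ n ih =>
    intro i ld vis hl hv hn
    have hi : i < trees.length := by omega
    have hrow : trees.getD i [] = trees[i] := List.getD_eq_getElem trees [] hi
    have hmem : trees[i] ∈ trees := List.getElem_mem hi
    have hrl : trees[i].length ≤ ld.length := hl _ hmem
    rw [aOuter, dif_pos hi]
    simp only [Bool.false_eq_true, if_false, hrow]
    rw [aInner_false i trees[i] 0 (-1) ld vis hrl]
    simp only [List.take_zero, List.drop_zero, List.nil_append]
    rw [inn_fst, inn_snd (i : Int) (fun k => (k : Int)) 0 (-1) trees[i] ld vis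
        (fun k1 k2 _ _ _ _ he => by
          have h : (k1 : Int) = (k2 : Int) := he
          exact_mod_cast h)]
    have hfilt : filt (i : Int) (fun k => (k : Int)) vis 0 (-1) trees[i] ld =
        filtC [] (coordsA i 0 trees[i].length) trees[i] (pM (-1) trees[i]) ld := by
      rw [filt_eq_filtC]
      simp only [coordsA]
      apply filtC_seen_ext
      intro c hc
      obtain ⟨u, _, hu⟩ := List.mem_map.mp hc
      have hc1 : c.1 = (i : Int) := by rw [← hu]
      have hnm : c ∉ vis := fun hcv => hv c hcv i le_rfl hc1
      simp [hnm]
    rw [hfilt]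
    rw [ih (i+1) (updL trees[i] ld) _
        (fun row hr => by rw [updL_length _ _ hrl]; exact hl row hr)
        (by
          intro p hp i' hi' hpe
          rcases List.mem_append.mp hp with hp | hp
          · exact hv p hp i' (by omega) hpe
          · have h1 := filtC_mem _ _ _ _ _ _ hp
            have h2 := mem_coordsA_fst _ _ _ _ h1
            rw [hpe] at h2
            have : i' = i := by exact_mod_cast h2
            omega)
        (by omega)]
    rw [List.drop_eq_getElem_cons hi, pass1F]
    simp

theorem aOuter_true (trees : List (List Int)) (i : Nat) (ld : List Int)
    (first extra : List (Int × Int))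
    (hl : ∀ row ∈ trees, row.length ≤ ld.length)
    (he : ∀ p ∈ extra, ∀ t : Nat, t < trees.length - i → p.1 ≠ (t : Int)) :
    aOuter trees true i ld (first ++ extra) =
      first ++ extra ++ pass2F first (trees.length - 1 - i) ld ((trees.take (trees.length - i)).reverse) := by
  suffices H : ∀ n i (ld : List Int) (extra : List (Int × Int)),
      (∀ row ∈ trees, row.length ≤ ld.length) →
      (∀ p ∈ extra, ∀ t : Nat, t < trees.length - i → p.1 ≠ (t : Int)) →
      trees.length - i = n →
      aOuter trees true i ld (first ++ extra) =
        first ++ extra ++ pass2F first (trees.length - 1 - i) ld ((trees.take (trees.length - i)).reverse) from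
    H _ i ld extra hl he rfl
  intro n
  induction n with
  | zero =>
    intro i ld extra hl he hn
    have hi : ¬ i < trees.length := by omega
    rw [aOuter, dif_neg hi, hn]
    simp [pass2F]
  | succ n ih =>
    intro i ld extra hl he hn
    have hi : i < trees.length := by omega
    obtain ⟨t, ht⟩ : ∃ t, t = trees.length - i - 1 := ⟨_, rfl⟩
    have hii : t < trees.length := by omega
    have e2 : trees.length - i = t + 1 := by omega
    have e3 : trees.length - 1 - i = t := by omega
    rw [aOuter, dif_pos hi]
    simp only [if_true]
    rw [← ht, e3, e2]
    have hrow : trees.getD t [] = trees[t] := List.getD_eq_getElem trees [] hii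
    have hmem : trees[t] ∈ trees := List.getElem_mem hii
    have hrl : trees[t].length ≤ ld.length := hl _ hmem
    rw [hrow]
    rw [aInner_true t trees[t] 0 (-1) ld (first ++ extra) hrl]
    simp only [Nat.sub_zero, List.take_length, List.drop_length, List.append_nil]
    rw [inn_fst]
    rw [inn_snd ((t : Nat) : Int)
        (fun k => ((trees[t].length - k - 1 : Nat) : Int)) 0 (-1)
        (trees[t].reverse) ((ld.take trees[t].length).reverse) (first ++ extra)
        (by
          intro k1 k2 h1 h2 h3 h4 heq
          simp only [List.length_reverse, Nat.zero_add] at h2 h4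
          have heq' : ((trees[t].length - k1 - 1 : Nat) : Int)
              = ((trees[t].length - k2 - 1 : Nat) : Int) := heq
          have : trees[t].length - k1 - 1 = trees[t].length - k2 - 1 := by exact_mod_cast heq'
          omega)]
    have hfld : (updL trees[t].reverse ((ld.take trees[t].length).reverse)).reverse
          ++ ld.drop trees[t].length
        = updL trees[t] ld := by
      rw [updL_reverse _ _ (by simp [List.length_take_of_le hrl]), List.reverse_reverse]
      exact updL_take _ _ hrl
    have hfilt : filt ((t : Nat) : Int)
        (fun k => ((trees[t].length - k - 1 : Nat) : Int))
        (first ++ extra) 0 (-1)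
        (trees[t].reverse) ((ld.take trees[t].length).reverse)
        = (filtC first (coordsA t 0 trees[t].length) trees[t]
            ((pM (-1) trees[t].reverse).reverse)
            (ld.take trees[t].length)).reverse := by
      rw [filt_append _ _ first extra 0 (-1) _ _
          (by
            intro p hp k' _ _ hpe
            have h1 := he p hp t (by omega)
            rw [hpe] at h1
            simp at h1)]
      rw [filt_eq_filtC]
      simp only [List.length_reverse]
      rw [coordsA_rev]
      rw [← filtC_reverse first (coordsA t 0 trees[t].length) trees[t]
            ((pM (-1) trees[t].reverse).reverse) (ld.take trees[t].length)
            (by simp [coordsA])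
            (by simp [coordsA, pM_length])
            (by simp [coordsA, List.length_take_of_le hrl])]
      rw [List.reverse_reverse]
    rw [hfilt, hfld]
    rw [List.append_assoc first extra _, ih (i+1) (updL trees[t] ld)
        (extra ++ _)
        (fun row hr => by rw [updL_length _ _ hrl]; exact hl row hr)
        (by
          intro p hp u hu hpe
          rcases List.mem_append.mp hp with hp | hp
          · exact he p hp u (by omega) hpe
          · have h1 := filtC_mem _ _ _ _ _ _ (List.mem_reverse.mp hp)
            have h2 := mem_coordsA_fst _ _ _ _ h1
            rw [hpe] at h2
            have : u = t := by exact_mod_cast h2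
            omega)
        (by omega)]
    have e4 : trees.length - 1 - (i+1) = t - 1 := by omega
    have e5 : trees.length - (i+1) = t := by omega
    rw [e4, e5]
    have htk : trees.take (t+1) = trees.take t ++ [trees[t]] := by
      rw [List.take_add_one]
      simp [List.getElem?_eq_getElem hii]
    rw [htk]
    simp only [List.reverse_append, List.reverse_cons, List.reverse_nil, List.nil_append,
      List.singleton_append]
    simp only [pass2F]
    simp

theorem rowB_first (iI : Int) (vs : List Int) : ∀ (ls ds : List Int) (k : Nat),
    (PySem.List.enumerate (vs.zip (ls.zip ds)) (k : Int)).filterMap (fun q =>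
        if q.2.1 > q.2.2.1 ∨ q.2.1 > q.2.2.2 then some (iI, q.1) else none)
      = filtC [] ((List.range' k vs.length).map (fun t : Nat => (iI, (t : Int)))) vs ls ds := by
  induction vs with
  | nil => intro ls ds k; simp [filtC]
  | cons v vs ih =>
    intro ls ds k
    cases ls with
    | nil => simp [filtC]
    | cons l ls =>
      cases ds with
      | nil => simp [filtC]
      | cons d ds =>
        simp only [List.zip_cons_cons, PySem.List.enumerate_cons, List.filterMap_cons,
          List.length_cons, List.range'_succ, List.map_cons]
        rw [show ((k : Int) + 1) = ((k + 1 : Nat) : Int) from by push_cast; ring, ih]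
        by_cases hc : v > l ∨ v > d
        · simp [filtC, hc]
        · obtain ⟨hc1, hc2⟩ := not_or.mp hc
          simp [filtC, hc1, hc2]

theorem rowB_first' (iI : Int) (vs ls ds : List Int) (s : Int) (k : Nat)
    (hs : s = (k : Int)) :
    (PySem.List.enumerate (vs.zip (ls.zip ds)) s).filterMap (fun q =>
        if q.2.1 > q.2.2.1 ∨ q.2.1 > q.2.2.2 then some (iI, q.1) else none)
      = filtC [] ((List.range' k vs.length).map (fun t : Nat => (iI, (t : Int)))) vs ls ds := by
  subst hs; exact rowB_first iI vs ls ds k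

theorem rowB_second (iI : Int) (seen : List (Int × Int)) (vs : List Int) :
    ∀ (ls ds : List Int) (k : Nat),
    (PySem.List.enumerate (vs.zip (ls.zip ds)) (k : Int)).filterMap (fun q =>
        if (q.2.1 > q.2.2.1 ∨ q.2.1 > q.2.2.2) ∧ ¬ (seen.contains (iI, q.1) = true)
        then some (iI, q.1) else none)
      = filtC seen ((List.range' k vs.length).map (fun t : Nat => (iI, (t : Int)))) vs ls ds := by
  induction vs with
  | nil => intro ls ds k; simp [filtC]
  | cons v vs ih =>
    intro ls ds k
    cases ls with
    | nil => simp [filtC]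
    | cons l ls =>
      cases ds with
      | nil => simp [filtC]
      | cons d ds =>
        simp only [List.zip_cons_cons, PySem.List.enumerate_cons, List.filterMap_cons,
          List.length_cons, List.range'_succ, List.map_cons]
        rw [show ((k : Int) + 1) = ((k + 1 : Nat) : Int) from by push_cast; ring, ih]
        by_cases hc : v > l ∨ v > d
        · by_cases hs : seen.contains (iI, (k : Int)) = true
          · have hsm : (iI, (k : Int)) ∈ seen := by simpa using hs
            simp [filtC, hc, hs, hsm]
          · have hsm : (iI, (k : Int)) ∉ seen := by simpa using hs
            simp [filtC, hc, hs, hsm]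
        · obtain ⟨hc1, hc2⟩ := not_or.mp hc
          simp [filtC, hc1, hc2]

theorem rowB_second' (iI : Int) (seen : List (Int × Int)) (vs ls ds : List Int)
    (s : Int) (k : Nat) (hs : s = (k : Int)) :
    (PySem.List.enumerate (vs.zip (ls.zip ds)) s).filterMap (fun q =>
        if (q.2.1 > q.2.2.1 ∨ q.2.1 > q.2.2.2) ∧ ¬ (seen.contains (iI, q.1) = true)
        then some (iI, q.1) else none)
      = filtC seen ((List.range' k vs.length).map (fun t : Nat => (iI, (t : Int)))) vs ls ds := by
  subst hs; exact rowB_second iI seen vs ls ds k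

theorem altFirst_eq (ts : List (List Int)) : ∀ (cm : List Int) (i : Nat),
    (PySem.List.enumerate (ts.zip ((ts.map (fun row => pM (-1) row)).zip (snaps cm ts))) (i : Int)).flatMap
      (fun p => (PySem.List.enumerate (p.2.1.zip (p.2.2.1.zip p.2.2.2)) 0).filterMap (fun q =>
        if q.2.1 > q.2.2.1 ∨ q.2.1 > q.2.2.2 then some (p.1, q.1) else none))
      = pass1F i cm ts := by
  induction ts with
  | nil => intro cm i; simp [pass1F]
  | cons row rest ih =>
    intro cm i
    simp only [List.map_cons, snaps, List.zip_cons_cons, PySem.List.enumerate_cons,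
      List.flatMap_cons, pass1F]
    rw [rowB_first' (i : Int) row (pM (-1) row) (cm.take row.length) 0 0 (by simp)]
    rw [show ((i : Int) + 1) = ((i + 1 : Nat) : Int) from by push_cast; ring, ih]
    rw [filtC_ds_take [] _ row (pM (-1) row) cm row.length le_rfl]
    rw [updL_eq_newmaxB]
    simp [coordsA]

theorem altFirst_eq' (ts : List (List Int)) (cm : List Int) (s : Int) (i : Nat)
    (hs : s = (i : Int)) :
    (PySem.List.enumerate (ts.zip ((ts.map (fun row => pM (-1) row)).zip (snaps cm ts))) s).flatMap
      (fun p => (PySem.List.enumerate (p.2.1.zip (p.2.2.1.zip p.2.2.2)) 0).filterMap (fun q =>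
        if q.2.1 > q.2.2.1 ∨ q.2.1 > q.2.2.2 then some (p.1, q.1) else none))
      = pass1F i cm ts := by
  subst hs; exact altFirst_eq ts cm i

theorem altSecond_eq (ts : List (List Int)) : ∀ (cm : List Int) (first : List (Int × Int)),
    ((PySem.List.enumerate
        (ts.zip ((ts.map (fun row => (pM (-1) row.reverse).reverse)).zip
          ((snaps cm ts.reverse).reverse))) 0).flatMap
      (fun p => (PySem.List.enumerate (p.2.1.zip (p.2.2.1.zip p.2.2.2)) 0).filterMap (fun q =>
        if (q.2.1 > q.2.2.1 ∨ q.2.1 > q.2.2.2) ∧ ¬ (first.contains (p.1, q.1) = true)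
        then some (p.1, q.1) else none))).reverse
      = pass2F first (ts.length - 1) cm ts.reverse := by
  induction ts using List.reverseRecOn with
  | nil => intro cm first; simp [pass2F]
  | append_singleton ts row ih =>
    intro cm first
    have hrev : (ts ++ [row]).reverse = row :: ts.reverse := by simp
    rw [hrev]
    simp only [snaps]
    have hlen1 : (ts.map (fun row => (pM (-1) row.reverse).reverse)).length = ts.length := by simp
    have hlen2 : ((snaps (newmaxB cm row) ts.reverse).reverse).length = ts.length := by
      simp [snaps_length]
    have hzip1 : ((ts ++ [row]).map (fun row => (pM (-1) row.reverse).reverse))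
        = ts.map (fun row => (pM (-1) row.reverse).reverse) ++ [(pM (-1) row.reverse).reverse] := by
      simp
    rw [hzip1]
    rw [List.reverse_cons]
    rw [List.zip_append (by omega : (ts.map (fun row => (pM (-1) row.reverse).reverse)).length = ((snaps (newmaxB cm row) ts.reverse).reverse).length)]
    rw [List.zip_append (by simp [snaps_length] : ts.length = (List.zip (ts.map fun row => (pM (-1) row.reverse).reverse) (snaps (newmaxB cm row) ts.reverse).reverse).length)]
    rw [PySem.List.enumerate_append]
    simp only [List.zip_cons_cons, List.zip_nil_right]
    have hzlen : ((ts.zip ((ts.map (fun row => (pM (-1) row.reverse).reverse)).zip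
        ((snaps (newmaxB cm row) ts.reverse).reverse))).length) = ts.length := by
      simp [snaps_length]
    simp only [PySem.List.enumerate_cons, PySem.List.enumerate_nil, List.flatMap_append,
      List.flatMap_cons, List.flatMap_nil, List.append_nil, List.reverse_append]
    rw [ih (newmaxB cm row) first]
    rw [show ((0 : Int) + ((ts.zip ((ts.map (fun row => (pM (-1) row.reverse).reverse)).zip
        ((snaps (newmaxB cm row) ts.reverse).reverse))).length : Int)) = ((ts.length : Nat) : Int) from by
      rw [hzlen]; ring]
    rw [rowB_second' ((ts.length : Nat) : Int) first row ((pM (-1) row.reverse).reverse)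
          (cm.take row.length) 0 0 (by simp)]
    have hpass : pass2F first ((ts ++ [row]).length - 1) cm (row :: ts.reverse)
        = (filtC first (coordsA ts.length 0 row.length) row ((pM (-1) row.reverse).reverse)
            (cm.take row.length)).reverse
          ++ pass2F first (ts.length - 1) (updL row cm) ts.reverse := by
      have : (ts ++ [row]).length - 1 = ts.length := by simp
      rw [this, pass2F]
    rw [hpass, updL_eq_newmaxB]
    simp [coordsA]

-- ===== VERDICT (by name: the statement is the Claim_ definition above) =====
theorem count_visible_down_right_spec : Claim_equal_count_visible_down_right := by
  intro trees hdom hpre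
  unfold Spec_count_visible_down_right
  obtain ⟨hne, hlen⟩ := hpre
  have hld : ∀ row ∈ trees, row.length ≤ (List.replicate (trees.getD 0 []).length (-1 : Int)).length := by
    intro row hr; simpa using hlen row hr
  rw [count_visible_down_right, count_visible_down_right_alt]
  simp only [List.foldl_cons, List.foldl_nil]
  rw [aOuter_false trees 0 _ [] hld (by simp)]
  simp only [List.nil_append, List.drop_zero]
  rw [show pass1F 0 (List.replicate (trees.getD 0 []).length (-1 : Int)) trees
        = pass1F 0 (List.replicate (trees.getD 0 []).length (-1 : Int)) trees ++ [] from by simp]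
  rw [aOuter_true trees 0 _ _ [] hld (by simp)]
  simp only [List.append_nil, Nat.sub_zero, List.take_length]
  simp only [prefixMaxB_eq_pM, colTablesB_eq_snaps]
  rw [altFirst_eq' trees (List.replicate (trees.getD 0 []).length (-1 : Int)) 0 0 (by simp)]
  have hsec : ∀ (L : List (Int × Int)),
      ((PySem.List.enumerate
        (trees.zip ((trees.map (fun row => (pM (-1) row.reverse).reverse)).zip
          ((snaps (List.replicate (trees.getD 0 []).length (-1 : Int)) trees.reverse).reverse))) 0).flatMap
      (fun p => (PySem.List.enumerate (p.2.1.zip (p.2.2.1.zip p.2.2.2)) 0).filterMap (fun q =>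
        if (q.2.1 > q.2.2.1 ∨ q.2.1 > q.2.2.2) ∧ ¬ (PySem.Set.contains (PySem.Set.ofList L) (p.1, q.1) = true)
        then some (p.1, q.1) else none))).reverse
      = pass2F L (trees.length - 1) (List.replicate (trees.getD 0 []).length (-1 : Int)) trees.reverse := by
    intro L
    have : ∀ (p : Int × (List Int × (List Int × List Int))) (q : Int × (Int × (Int × Int))),
        (PySem.Set.contains (PySem.Set.ofList L) (p.1, q.1)) = L.contains (p.1, q.1) := by
      intro p q
      rw [PySem.Set.contains_eq_listContains]
      by_cases h : (p.1, q.1) ∈ L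
      · simp [PySem.Set.mem_ofList, h]
      · simp [PySem.Set.mem_ofList, h]
    simp only [this]
    exact altSecond_eq trees _ L
  rw [hsec]
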